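-- pv_equiv track=rewrite | github.com/szkongto/kongto-blog | distribution/content_transformer_v2.py | _fix_markdown_tables
-- ===== SOURCE A (Python) =====
-- def _fix_markdown_tables(content):
--     """修复Markdown表格格式"""
--     lines = content.split('\n')
--     fixed_lines = []
--     in_table = False
--
--     for i, line in enumerate(lines):
--         # 检测表格行
--         if '|' in line and line.strip().startswith('|'):
--             if not in_table:
--                 in_table = True
--                 fixed_lines.append('')  # 表格前加空行
--             fixed_lines.append(line)
--         else:
--             if in_table:
--                 fixed_lines.append('')  # 表格后加空行
--                 in_table = False
--             fixed_lines.append(line)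
--
--     return '\n'.join(fixed_lines)
-- ===== SOURCE B (Python) =====
-- def _is_table_line(line):
--     return '|' in line and line.strip().startswith('|')
--
--
-- def _fix_markdown_tables(content):
--     """Run-based rewrite: split lines into maximal runs of table/non-table
--     lines and emit a blank line exactly where the run kind changes
--     (treating the start of the text as a non-table run)."""
--     lines = content.split('\n')
--     out = []
--     prev_table = False
--     i = 0
--     n = len(lines)
--     while i < n:
--         kind = _is_table_line(lines[i])
--         j = i + 1
--         while j < n and _is_table_line(lines[j]) == kind:
--             j += 1
--         if kind != prev_table:
--             out.append('')
--         out.extend(lines[i:j])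
--         prev_table = kind
--         i = j
--     return '\n'.join(out)
-- ===== Notes on version B (the rewrite author's own statement) =====
-- stated objective: alternative
-- what changed: Replaced the per-line in_table state machine with a run-based pass: lines are segmented into maximal table/non-table runs and a blank line is emitted exactly where the run kind changes.
import Mathlib
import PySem

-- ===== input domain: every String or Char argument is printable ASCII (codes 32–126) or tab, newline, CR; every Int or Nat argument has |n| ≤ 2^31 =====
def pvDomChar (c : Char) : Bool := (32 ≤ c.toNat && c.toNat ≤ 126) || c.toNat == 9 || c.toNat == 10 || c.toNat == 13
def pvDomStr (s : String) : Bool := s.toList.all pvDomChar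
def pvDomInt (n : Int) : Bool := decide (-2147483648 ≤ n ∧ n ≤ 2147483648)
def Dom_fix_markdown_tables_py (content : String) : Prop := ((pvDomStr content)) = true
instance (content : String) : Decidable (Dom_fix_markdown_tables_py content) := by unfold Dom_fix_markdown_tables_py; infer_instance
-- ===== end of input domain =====

-- B replaces A's per-line in_table state machine by a run-based pass (blank line exactly where the run kind changes); same cost, different decomposition.

-- ===== PORT A =====
-- the loop body: state is (fixed_lines, in_table)
def fixAStep (st : List String × Bool) (line : String) : List String × Bool :=
  if PySem.Str.isIn "|" line && PySem.Str.startswith (PySem.Str.strip line) "|" then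
    ((if st.2 then st.1 else st.1 ++ [""]) ++ [line], true)
  else
    ((if st.2 then st.1 ++ [""] else st.1) ++ [line], false)

def fix_markdown_tables_py (content : String) : String :=
  PySem.Str.join "\n" ((((PySem.Str.split? content "\n").getD []).foldl fixAStep ([], false)).1)

-- ===== PORT B =====
def isTableLine (line : String) : Bool :=
  PySem.Str.isIn "|" line && PySem.Str.startswith (PySem.Str.strip line) "|"

-- Source B's while loop: take the maximal run of lines of the same kind, emit a blank iff the kind changes
def fixBRuns : List String → Bool → List String
  | [], _ => []
  | l :: rest, prev =>
    let k := isTableLine l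
    (if k != prev then [""] else []) ++ (l :: rest.takeWhile (fun x => isTableLine x == k))
      ++ fixBRuns (rest.dropWhile (fun x => isTableLine x == k)) k
termination_by lines _ => lines.length
decreasing_by
  simp only [List.length_cons]
  exact Nat.lt_succ_of_le (List.length_dropWhile_le _ _)

def fix_markdown_tables_py_alt (content : String) : String :=
  PySem.Str.join "\n" (fixBRuns ((PySem.Str.split? content "\n").getD []) false)

-- ===== PRECONDITION & SPEC =====
def Spec_fix_markdown_tables_py (content : String) (out : String) : Prop := out = fix_markdown_tables_py_alt content
instance (content : String) (out : String) : Decidable (Spec_fix_markdown_tables_py content out) := by unfold Spec_fix_markdown_tables_py; infer_instance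

-- ===== CLAIM (what is proved, stated in full; the proofs are below) =====
def Claim_equal_fix_markdown_tables_py : Prop := ∀ (content : String), Dom_fix_markdown_tables_py content → Spec_fix_markdown_tables_py content (fix_markdown_tables_py content)

-- ===== LEMMAS AND PROOFS =====

-- A's per-line emission, accumulator-free: a blank line exactly when the line's kind differs from the state
def goA : List String → Bool → List String
  | [], _ => []
  | l :: rest, t => (if isTableLine l != t then [""] else []) ++ [l] ++ goA rest (isTableLine l)

theorem foldA_eq_goA (lines : List String) (acc : List String) (t : Bool) :
    (lines.foldl fixAStep (acc, t)).1 = acc ++ goA lines t := by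
  induction lines generalizing acc t with
  | nil => simp [goA]
  | cons l rest ih =>
    cases hk : PySem.Str.isIn "|" l && PySem.Str.startswith (PySem.Str.strip l) "|" <;>
      cases t <;>
      · simp only [List.foldl_cons, fixAStep, goA, isTableLine, hk]
        simp [ih]

theorem goA_run (run : List String) (rest : List String) (k : Bool)
    (h : ∀ x ∈ run, isTableLine x = k) :
    goA (run ++ rest) k = run ++ goA rest k := by
  induction run with
  | nil => rfl
  | cons x run' ih =>
    have hx : isTableLine x = k := h x (by simp)
    simp [goA, hx, ih (fun y hy => h y (by simp [hy]))]

theorem fixBRuns_eq_goA (lines : List String) (prev : Bool) :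
    fixBRuns lines prev = goA lines prev := by
  induction lines, prev using fixBRuns.induct with
  | case1 prev => rw [fixBRuns]; rfl
  | case2 l rest prev k ih =>
    have hsplit : rest.takeWhile (fun x => isTableLine x == isTableLine l) ++
        rest.dropWhile (fun x => isTableLine x == isTableLine l) = rest :=
      List.takeWhile_append_dropWhile
    have hrun : ∀ x ∈ rest.takeWhile (fun x => isTableLine x == isTableLine l),
        isTableLine x = isTableLine l := by
      intro x hx
      simpa using List.mem_takeWhile_imp hx
    calc fixBRuns (l :: rest) prev
        = (if isTableLine l != prev then [""] else []) ++
            (l :: rest.takeWhile (fun x => isTableLine x == isTableLine l)) ++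
            goA (rest.dropWhile (fun x => isTableLine x == isTableLine l)) (isTableLine l) := by
          rw [fixBRuns, ih]
      _ = goA (l :: rest) prev := by
          conv_rhs => rw [goA, ← hsplit]
          rw [goA_run _ _ _ hrun]
          simp

-- ===== VERDICT (by name: the statement is the Claim_ definition above) =====
theorem fix_markdown_tables_py_spec : Claim_equal_fix_markdown_tables_py := by
  intro content _
  show _ = _
  unfold fix_markdown_tables_py fix_markdown_tables_py_alt
  rw [foldA_eq_goA, fixBRuns_eq_goA]
  rfl
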